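-- pv_equiv track=rewrite | github.com/forwarder1121/forwarder1121.github.io | 백준/Silver/1697. 숨바꼭질/숨바꼭질.py | bfs
-- ===== SOURCE A (Python) =====
-- from collections import deque
--
-- def bfs(start,target):
--     visited=[False]*100001
--     dist=[0]*100001
--
--     queue=deque()
--     queue.append(start)
--     visited[start]=True
--
--     while queue:
--         curr=queue.popleft()
--
--         if curr==target:
--             return dist[curr]
--
--         for next_pos in (curr-1,curr+1,curr*2):
--             if 0<=next_pos<=100000:
--                 if not visited[next_pos]:
--                     visited[next_pos]=True
--                     dist[next_pos]=dist[curr]+1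
--                     queue.append(next_pos)
-- ===== SOURCE B (Python) =====
-- def bfs(start, target):
--     # Level-synchronous BFS: process one whole distance level per outer
--     # iteration and keep a single global step counter instead of a per-node
--     # dist array.
--     visited = [False] * 100001
--     visited[start] = True
--     frontier = [start]
--     step = 0
--     while frontier:
--         if target in frontier:
--             return step
--         nxt = []
--         for curr in frontier:
--             for np in (curr - 1, curr + 1, curr * 2):
--                 if 0 <= np <= 100000 and not visited[np]:
--                     visited[np] = True
--                     nxt.append(np)
--         frontier = nxt
--         step += 1
--     return None
-- ===== Notes on version B (the rewrite author's own statement) =====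
-- stated objective: alternative
-- what changed: Replaced the deque-plus-per-node-dist-array BFS by a level-synchronous BFS that expands one whole distance level per outer iteration and keeps a single global step counter instead of a dist array.
-- outside the precondition, e.g. on bfs(-5, -5): A returns 0, B returns 0; on bfs(-1, 50): A returns 9, B returns 9
import Mathlib
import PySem

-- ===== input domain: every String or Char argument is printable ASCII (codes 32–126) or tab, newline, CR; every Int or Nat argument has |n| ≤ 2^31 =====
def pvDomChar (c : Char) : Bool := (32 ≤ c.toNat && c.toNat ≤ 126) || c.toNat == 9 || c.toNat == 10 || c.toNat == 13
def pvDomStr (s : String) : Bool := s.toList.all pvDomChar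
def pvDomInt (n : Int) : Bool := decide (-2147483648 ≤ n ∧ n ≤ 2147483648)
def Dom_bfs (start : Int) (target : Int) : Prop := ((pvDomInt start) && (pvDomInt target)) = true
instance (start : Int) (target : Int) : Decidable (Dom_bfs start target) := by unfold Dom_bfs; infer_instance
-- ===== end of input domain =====

-- B replaces A's deque-plus-per-node-dist-array BFS by a level-synchronous BFS
-- (whole-frontier expansion with one global step counter); same cost, different structure.
-- Python's mutable bool/int lists are ported as functional Arrays; indexing is exact for
-- indices 0..100000, which Pre_bfs guarantees.

-- ===== PORT A =====
-- collections.deque is ported as the standard two-list functional queue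
-- (front to pop from, back to append to; amortized O(1) popleft/append)
def deqPop (front back : List Int) : Option (Int × List Int × List Int) :=
  match front with
  | c :: f => some (c, f, back)
  | [] =>
    match back.reverse with
    | [] => none
    | c :: f => some (c, f, ([] : List Int))

-- one neighbour of the inner 'for next_pos in (curr-1,curr+1,curr*2)' loop;
-- state = (visited, dist, back of the queue)
def stepA (curr : Int) (st : Array Bool × Array Int × List Int) (np : Int) :
    Array Bool × Array Int × List Int :=
  match st with
  | (visited, dist, back) =>
    if 0 ≤ np ∧ np ≤ 100000 then
      if visited[np.toNat]! = false then
        (visited.setIfInBounds np.toNat true,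
         dist.setIfInBounds np.toNat (dist[curr.toNat]! + 1),
         np :: back)
      else (visited, dist, back)
    else (visited, dist, back)

-- the 'while queue' loop; fuel bounds the number of pops (≤ 100003 ever happen);
-- 'some 0' on an empty queue stands for Python's 'return None', excluded by Pre_bfs
def loopA (target : Int) : Nat → List Int → List Int → Array Bool → Array Int → Option Int
  | 0, _, _, _, _ => none
  | fuel + 1, front, back, visited, dist =>
    match deqPop front back with
    | none => some 0
    | some (curr, front', back') =>
      if curr = target then some (dist[curr.toNat]!)
      else
        match [curr - 1, curr + 1, curr * 2].foldl (stepA curr) (visited, dist, back') with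
        | (visited', dist', back'') => loopA target fuel front' back'' visited' dist' 

def bfs (start : Int) (target : Int) : Int :=
  let visited := (Array.replicate 100001 false).setIfInBounds start.toNat true
  let dist : Array Int := Array.replicate 100001 0
  (loopA target 400004 [start] [] visited dist).getD 0

-- ===== PORT B =====
-- one neighbour of B's inner loop; state = (visited, nxt)
def stepB (st : Array Bool × List Int) (np : Int) : Array Bool × List Int :=
  match st with
  | (visited, nxt) =>
    if (0 ≤ np ∧ np ≤ 100000) ∧ visited[np.toNat]! = false then
      (visited.setIfInBounds np.toNat true, nxt ++ [np])
    else (visited, nxt)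

-- one 'curr' of B's 'for curr in frontier' loop
def levelB (st : Array Bool × List Int) (curr : Int) : Array Bool × List Int :=
  [curr - 1, curr + 1, curr * 2].foldl stepB st

-- the 'while frontier' loop; fuel bounds the number of levels (≤ 100003 ever happen);
-- 'some 0' on an empty frontier stands for Python's 'return None', excluded by Pre_bfs
def loopB (target : Int) : Nat → List Int → Array Bool → Int → Option Int
  | 0, _, _, _ => none
  | _ + 1, [], _, _ => some 0
  | fuel + 1, f0 :: rest, visited, step =>
    if (f0 :: rest).contains target then some step
    else
      match (f0 :: rest).foldl levelB (visited, []) with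
      | (visited', nxt) => loopB target fuel nxt visited' (step + 1)

def bfs_alt (start : Int) (target : Int) : Int :=
  let visited := (Array.replicate 100001 false).setIfInBounds start.toNat true
  (loopB target 200002 [start] visited 0).getD 0

-- ===== PRECONDITION & SPEC =====
-- Pre_ excludes out-of-range start/target: there A either raises IndexError (|start| too
-- large) or falls off the loop returning None (not an int); the few out-of-range inputs where
-- Python's negative-index wraparound still lets A return an int are excluded as accidental.
def Pre_bfs (start : Int) (target : Int) : Prop :=
  0 ≤ start ∧ start ≤ 100000 ∧ 0 ≤ target ∧ target ≤ 100000
instance (start : Int) (target : Int) : Decidable (Pre_bfs start target) := by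
  unfold Pre_bfs; infer_instance

def pvWitness_bfs : Int × Int := (3, 10)

def Spec_bfs (start : Int) (target : Int) (out : Int) : Prop := out = bfs_alt start target
instance (start : Int) (target : Int) (out : Int) : Decidable (Spec_bfs start target out) := by
  unfold Spec_bfs; infer_instance

-- ===== CLAIM (what is proved, stated in full; the proofs are below) =====
def Claim_equal_bfs : Prop := ∀ (start : Int) (target : Int), Dom_bfs start target → Pre_bfs start target → Spec_bfs start target (bfs start target)

-- ===== LEMMAS AND PROOFS =====

-- proof layer: loopA with the queue flattened to one plain list (model of the deque);
-- the bridge lemmas below show loopA computes exactly this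
def stepL (curr : Int) (st : Array Bool × Array Int × List Int) (np : Int) :
    Array Bool × Array Int × List Int :=
  if 0 ≤ np ∧ np ≤ 100000 then
    if st.1[np.toNat]! = false then
      (st.1.setIfInBounds np.toNat true,
       st.2.1.setIfInBounds np.toNat (st.2.1[curr.toNat]! + 1),
       st.2.2 ++ [np])
    else st
  else st

def loopL (target : Int) : Nat → List Int → Array Bool → Array Int → Option Int
  | 0, _, _, _ => none
  | _ + 1, [], _, _ => some 0
  | fuel + 1, curr :: queue, visited, dist =>
    if curr = target then some (dist[curr.toNat]!)
    else
      let st := [curr - 1, curr + 1, curr * 2].foldl (stepL curr) (visited, dist, queue)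
      loopL target fuel st.2.2 st.1 st.2.1

-- the two fold flavours produce the same arrays; the deque's back collects the
-- appended nodes in reverse while the flat queue appends them at its end
theorem foldA_bridge (curr : Int) :
    ∀ (ns : List Int) (vis : Array Bool) (dist : Array Int) (back q : List Int),
    ∃ (ext : List Int) (vis' : Array Bool) (dist' : Array Int),
      ns.foldl (stepA curr) (vis, dist, back) = (vis', dist', ext.reverse ++ back) ∧
      ns.foldl (stepL curr) (vis, dist, q) = (vis', dist', q ++ ext) := by
  intro ns
  induction ns with
  | nil => intro vis dist back q; exact ⟨[], vis, dist, by simp, by simp⟩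
  | cons np ns ih =>
    intro vis dist back q
    by_cases hr : 0 ≤ np ∧ np ≤ 100000
    · by_cases hu : vis[np.toNat]! = false
      · obtain ⟨ext, vis', dist', eP, eL⟩ :=
          ih (vis.setIfInBounds np.toNat true)
            (dist.setIfInBounds np.toNat (dist[curr.toNat]! + 1)) (np :: back) (q ++ [np])
        refine ⟨np :: ext, vis', dist', ?_, ?_⟩
        · simpa [stepA, hr, hu] using eP
        · simpa [stepL, hr, hu] using eL
      · obtain ⟨ext, vis', dist', eP, eL⟩ := ih vis dist back q
        exact ⟨ext, vis', dist', by simpa [stepA, hr, hu] using eP,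
          by simpa [stepL, hr, hu] using eL⟩
    · obtain ⟨ext, vis', dist', eP, eL⟩ := ih vis dist back q
      exact ⟨ext, vis', dist', by simpa [stepA, hr] using eP,
        by simpa [stepL, hr] using eL⟩

-- the two-list deque loop equals the flat-list loop on the flattened queue
theorem loopA_bridge (target : Int) :
    ∀ (fuel : Nat) (front back : List Int) (vis : Array Bool) (dist : Array Int),
    loopA target fuel front back vis dist =
      loopL target fuel (front ++ back.reverse) vis dist := by
  intro fuel
  induction fuel with
  | zero => intro front back vis dist; simp [loopA, loopL]
  | succ fuel ih =>
    intro front back vis dist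
    cases front with
    | cons c f =>
      obtain ⟨ext, vis', dist', eP, eL⟩ :=
        foldA_bridge c [c - 1, c + 1, c * 2] vis dist back (f ++ back.reverse)
      simp only [loopA, deqPop, List.cons_append, loopL]
      by_cases hct : c = target
      · simp [hct]
      · simp only [if_neg hct, eP, eL, ih]
        have : (ext.reverse ++ back).reverse = back.reverse ++ ext := by simp
        rw [this, List.append_assoc]
    | nil =>
      cases hb : back.reverse with
      | nil =>
        have : back = [] := by simpa using congrArg List.reverse hb
        subst this
        simp [loopA, deqPop, loopL]
      | cons c f =>
        obtain ⟨ext, vis', dist', eP, eL⟩ :=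
          foldA_bridge c [c - 1, c + 1, c * 2] vis dist [] f
        simp only [loopA, deqPop, hb, List.nil_append, loopL]
        by_cases hct : c = target
        · simp [hct]
        · simp only [if_neg hct, eP, eL, ih]
          have : (ext.reverse ++ ([] : List Int)).reverse = ext := by simp
          rw [this]


-- getElem! facts about functional array update / replicate
theorem aget_set_self {α : Type} [Inhabited α] (a : Array α) (j : Nat) (hj : j < a.size) (x : α) :
    (a.setIfInBounds j x)[j]! = x := by
  simp [hj]

theorem aget_set_ne {α : Type} [Inhabited α] (a : Array α) (j i : Nat) (h : i ≠ j) (x : α) :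
    (a.setIfInBounds j x)[i]! = a[i]! := by
  simp [Array.getElem!_eq_getD, Array.getD_eq_getD_getElem?, Ne.symm h]

theorem aget_replicate {α : Type} [Inhabited α] (n i : Nat) (h : i < n) (x : α) :
    (Array.replicate n x)[i]! = x := by
  simp [h]

-- number of unvisited cells: the termination measure
def unvis (v : Array Bool) : Nat :=
  ((Finset.range 100001).filter (fun i => v[i]! = false)).card

theorem unvis_le (v : Array Bool) : unvis v ≤ 100001 :=
  le_trans (Finset.card_filter_le _ _) (by simp)

theorem unvis_set (v : Array Bool) (j : Nat) (hsz : v.size = 100001) (hj : j < 100001)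
    (hv : v[j]! = false) :
    unvis v = unvis (v.setIfInBounds j true) + 1 := by
  have hmem : j ∈ (Finset.range 100001).filter (fun i => v[i]! = false) := by
    simp [Finset.mem_filter, hj, hv]
  have hset : (Finset.range 100001).filter (fun i => (v.setIfInBounds j true)[i]! = false)
      = ((Finset.range 100001).filter (fun i => v[i]! = false)).erase j := by
    ext i
    by_cases hij : i = j
    · subst hij
      simp [Finset.mem_filter, Finset.mem_erase, aget_set_self v i (by omega) true]
    · simp [Finset.mem_filter, Finset.mem_erase, aget_set_ne v j i hij true, hij]
  have hpos : 0 < ((Finset.range 100001).filter (fun i => v[i]! = false)).card :=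
    Finset.card_pos.mpr ⟨j, hmem⟩
  unfold unvis
  rw [hset, Finset.card_erase_of_mem hmem]
  omega

-- index bounds for an in-range board cell
theorem toNat_lt (n : Int) (h0 : 0 ≤ n) (h1 : n ≤ 100000) : n.toNat < 100001 := by omega

-- one pop of A expands exactly like one frontier element of B
theorem pop_sim (curr d : Int) (ns : List Int) :
    ∀ (vis : Array Bool) (dist : Array Int) (q acc : List Int),
    vis.size = 100001 → dist.size = 100001 →
    vis[curr.toNat]! = true → dist[curr.toNat]! = d →
    ∃ (vis' : Array Bool) (dist' : Array Int) (new : List Int),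
      ns.foldl (stepL curr) (vis, dist, q) = (vis', dist', q ++ new) ∧
      ns.foldl stepB (vis, acc) = (vis', acc ++ new) ∧
      vis'.size = 100001 ∧ dist'.size = 100001 ∧
      (∀ n ∈ new, 0 ≤ n ∧ n ≤ 100000 ∧ vis'[n.toNat]! = true ∧ dist'[n.toNat]! = d + 1) ∧
      (∀ i : Nat, vis[i]! = true → vis'[i]! = true ∧ dist'[i]! = dist[i]!) ∧
      unvis vis = unvis vis' + new.length := by
  induction ns with
  | nil =>
    intro vis dist q acc h1 h2 h3 h4
    exact ⟨vis, dist, [], by simp, by simp, h1, h2, by simp, fun i h => ⟨h, rfl⟩, by simp⟩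
  | cons np ns ih =>
    intro vis dist q acc h1 h2 h3 h4
    by_cases hr : 0 ≤ np ∧ np ≤ 100000
    · by_cases hu : vis[np.toNat]! = false
      · -- np is appended
        have hlt : np.toNat < 100001 := toNat_lt np hr.1 hr.2
        have hcn : curr.toNat ≠ np.toNat := by
          intro h; rw [h] at h3; rw [h3] at hu; exact Bool.true_eq_false.mp hu
        have hA : stepL curr (vis, dist, q) np =
            (vis.setIfInBounds np.toNat true,
             dist.setIfInBounds np.toNat (dist[curr.toNat]! + 1), q ++ [np]) := by
          simp [stepL, hr, hu]
        have hB : stepB (vis, acc) np =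
            (vis.setIfInBounds np.toNat true, acc ++ [np]) := by
          simp [stepB, hr, hu]
        set vis1 := vis.setIfInBounds np.toNat true with hvis1
        set dist1 := dist.setIfInBounds np.toNat (dist[curr.toNat]! + 1) with hdist1
        have h1' : vis1.size = 100001 := by simp [hvis1, h1]
        have h2' : dist1.size = 100001 := by simp [hdist1, h2]
        have h3' : vis1[curr.toNat]! = true := by
          rw [hvis1, aget_set_ne vis np.toNat curr.toNat hcn true]; exact h3
        have h4' : dist1[curr.toNat]! = d := by
          rw [hdist1, aget_set_ne dist np.toNat curr.toNat hcn _]; exact h4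
        obtain ⟨vis', dist', new, eA, eB, s1, s2, hnew, hpres, hcount⟩ :=
          ih vis1 dist1 (q ++ [np]) (acc ++ [np]) h1' h2' h3' h4'
        have hnp1 : vis1[np.toNat]! = true := by
          rw [hvis1]; exact aget_set_self vis np.toNat (by omega) true
        have hnp2 : dist1[np.toNat]! = d + 1 := by
          rw [hdist1, aget_set_self dist np.toNat (by omega) _, h4]
        obtain ⟨hnpv, hnpd⟩ := hpres np.toNat hnp1
        refine ⟨vis', dist', np :: new, ?_, ?_, s1, s2, ?_, ?_, ?_⟩
        · simpa [hA, List.append_assoc] using eA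
        · simpa [hB, List.append_assoc] using eB
        · intro n hn
          rcases List.mem_cons.mp hn with rfl | hn
          · exact ⟨hr.1, hr.2, hnpv, by rw [hnpd, hnp2]⟩
          · exact hnew n hn
        · intro i hi
          have hi1 : vis1[i]! = true := by
            by_cases hinp : i = np.toNat
            · rw [hinp]; exact hnp1
            · rw [hvis1, aget_set_ne vis np.toNat i hinp true]; exact hi
          obtain ⟨pv, pd⟩ := hpres i hi1
          refine ⟨pv, ?_⟩
          rw [pd]
          have hinp : i ≠ np.toNat := by
            intro h; rw [h] at hi; rw [hi] at hu; exact Bool.true_eq_false.mp hu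
          rw [hdist1, aget_set_ne dist np.toNat i hinp _]
        · have := unvis_set vis np.toNat h1 hlt hu
          rw [this, ← hvis1, hcount]; simp; omega
      · -- in range but already visited: both steps are the identity
        have hA : stepL curr (vis, dist, q) np = (vis, dist, q) := by simp [stepL, hr, hu]
        have hB : stepB (vis, acc) np = (vis, acc) := by simp [stepB, hr, hu]
        obtain ⟨vis', dist', new, eA, eB, s1, s2, hnew, hpres, hcount⟩ :=
          ih vis dist q acc h1 h2 h3 h4
        exact ⟨vis', dist', new, by simpa [hA] using eA, by simpa [hB] using eB,
          s1, s2, hnew, hpres, hcount⟩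
    · -- out of range: both steps are the identity
      have hA : stepL curr (vis, dist, q) np = (vis, dist, q) := by simp [stepL, hr]
      have hB : stepB (vis, acc) np = (vis, acc) := by simp [stepB, hr]
      obtain ⟨vis', dist', new, eA, eB, s1, s2, hnew, hpres, hcount⟩ :=
        ih vis dist q acc h1 h2 h3 h4
      exact ⟨vis', dist', new, by simpa [hA] using eA, by simpa [hB] using eB,
        s1, s2, hnew, hpres, hcount⟩

-- if the target sits in the current level, A returns the level's distance d
theorem level_hit (target d : Int) :
    ∀ (R acc : List Int) (vis : Array Bool) (dist : Array Int),
    vis.size = 100001 → dist.size = 100001 →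
    (∀ n ∈ R, 0 ≤ n ∧ n ≤ 100000 ∧ vis[n.toNat]! = true ∧ dist[n.toNat]! = d) →
    target ∈ R →
    ∀ f, loopL target (R.length + f) (R ++ acc) vis dist = some d := by
  intro R
  induction R with
  | nil => intro acc vis dist _ _ _ ht; exact absurd ht (List.not_mem_nil)
  | cons curr R' ih =>
    intro acc vis dist h1 h2 hR ht f
    have hlen : (curr :: R').length + f = (R'.length + f) + 1 := by simp; omega
    rw [hlen]
    by_cases hct : curr = target
    · subst hct
      simp only [List.cons_append, loopL, if_pos trivial]
      exact congrArg some (hR curr (by simp)).2.2.2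
    · have ht' : target ∈ R' := by
        rcases List.mem_cons.mp ht with h | h
        · exact absurd h.symm hct
        · exact h
      obtain ⟨hc0, hc1, hcv, hcd⟩ := hR curr (by simp)
      obtain ⟨vis', dist', new, eA, _, s1, s2, hnew, hpres, _⟩ :=
        pop_sim curr d [curr - 1, curr + 1, curr * 2] vis dist (R' ++ acc) [] h1 h2 hcv hcd
      simp only [List.cons_append, loopL, if_neg (by simpa using hct)]
      rw [eA]
      have hq : (R' ++ acc) ++ new = R' ++ (acc ++ new) := by simp
      rw [hq]
      exact ih (acc ++ new) vis' dist' s1 s2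
        (fun n hn => by
          obtain ⟨a, b, c, dd⟩ := hR n (by simp [hn])
          obtain ⟨pv, pd⟩ := hpres n.toNat c
          exact ⟨a, b, pv, by rw [pd, dd]⟩) ht' f

-- if the target is not in the current level, A consumes the whole level and lands on
-- exactly the frontier B computes, with every new node at distance d+1
theorem level_miss (target d : Int) :
    ∀ (R acc : List Int) (vis : Array Bool) (dist : Array Int),
    vis.size = 100001 → dist.size = 100001 →
    (∀ n ∈ R, 0 ≤ n ∧ n ≤ 100000 ∧ vis[n.toNat]! = true ∧ dist[n.toNat]! = d) →
    (∀ n ∈ acc, 0 ≤ n ∧ n ≤ 100000 ∧ vis[n.toNat]! = true ∧ dist[n.toNat]! = d + 1) →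
    target ∉ R →
    ∃ (vis' : Array Bool) (dist' : Array Int) (new : List Int),
      R.foldl levelB (vis, acc) = (vis', acc ++ new) ∧
      (∀ f, loopL target (R.length + f) (R ++ acc) vis dist =
        loopL target f (acc ++ new) vis' dist') ∧
      vis'.size = 100001 ∧ dist'.size = 100001 ∧
      (∀ n ∈ acc ++ new, 0 ≤ n ∧ n ≤ 100000 ∧ vis'[n.toNat]! = true ∧ dist'[n.toNat]! = d + 1) ∧
      unvis vis = unvis vis' + new.length := by
  intro R
  induction R with
  | nil =>
    intro acc vis dist h1 h2 _ hacc _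
    exact ⟨vis, dist, [], by simp, fun f => by simp, h1, h2, by simpa using hacc, by simp⟩
  | cons curr R' ih =>
    intro acc vis dist h1 h2 hR hacc ht
    obtain ⟨hc0, hc1, hcv, hcd⟩ := hR curr (by simp)
    obtain ⟨vis1, dist1, new1, eA, eB, s1, s2, hnew1, hpres1, hcount1⟩ :=
      pop_sim curr d [curr - 1, curr + 1, curr * 2] vis dist (R' ++ acc) acc h1 h2 hcv hcd
    have hR' : ∀ n ∈ R', 0 ≤ n ∧ n ≤ 100000 ∧ vis1[n.toNat]! = true ∧ dist1[n.toNat]! = d := by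
      intro n hn
      obtain ⟨a, b, c, dd⟩ := hR n (by simp [hn])
      obtain ⟨pv, pd⟩ := hpres1 n.toNat c
      exact ⟨a, b, pv, by rw [pd, dd]⟩
    have hacc1 : ∀ n ∈ acc ++ new1,
        0 ≤ n ∧ n ≤ 100000 ∧ vis1[n.toNat]! = true ∧ dist1[n.toNat]! = d + 1 := by
      intro n hn
      rcases List.mem_append.mp hn with hn | hn
      · obtain ⟨a, b, c, dd⟩ := hacc n hn
        obtain ⟨pv, pd⟩ := hpres1 n.toNat c
        exact ⟨a, b, pv, by rw [pd, dd]⟩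
      · exact hnew1 n hn
    have ht' : target ∉ R' := fun h => ht (by simp [h])
    obtain ⟨vis', dist', new2, eB2, eA2, s1', s2', hnew', hcount'⟩ :=
      ih (acc ++ new1) vis1 dist1 s1 s2 hR' hacc1 ht'
    have hct : ¬ curr = target := fun h => ht (by simp [h])
    refine ⟨vis', dist', new1 ++ new2, ?_, ?_, s1', s2', ?_, ?_⟩
    · have : levelB (vis, acc) curr = (vis1, acc ++ new1) := eB
      simp only [List.foldl_cons, this, eB2, List.append_assoc]
    · intro f
      have hlen : (curr :: R').length + f = (R'.length + f) + 1 := by simp; omega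
      rw [hlen]
      simp only [List.cons_append, loopL, if_neg hct]
      rw [eA]
      have hq : (R' ++ acc) ++ new1 = R' ++ (acc ++ new1) := by simp
      rw [hq, eA2 f, List.append_assoc]
    · intro n hn
      apply hnew'
      simpa [List.append_assoc] using hn
    · rw [hcount1, hcount']; simp; omega

-- loopL is monotone in its fuel once it returns a value
theorem loopL_mono (target : Int) :
    ∀ (f f' : Nat), f ≤ f' → ∀ (q : List Int) (vis : Array Bool) (dist : Array Int) (v : Int),
    loopL target f q vis dist = some v → loopL target f' q vis dist = some v := by
  intro f
  induction f with
  | zero => intro f' _ q vis dist v h; simp [loopL] at h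
  | succ f ih =>
    intro f' hle q vis dist v h
    obtain ⟨f'', rfl⟩ : ∃ f'', f' = f'' + 1 := ⟨f' - 1, by omega⟩
    cases q with
    | nil => simpa [loopL] using h
    | cons curr rest =>
      simp only [loopL] at h ⊢
      by_cases hct : curr = target
      · simpa [hct] using h
      · rw [if_neg hct] at h ⊢
        exact ih f'' (by omega) _ _ _ v h

-- main simulation: from a level boundary, B's level loop and A's queue loop return the
-- same value, and A needs at most |frontier| + unvis + 1 pops
theorem main_sim (target : Int) :
    ∀ (fB : Nat) (F : List Int) (vis : Array Bool) (dist : Array Int) (d : Int),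
    vis.size = 100001 → dist.size = 100001 →
    (∀ n ∈ F, 0 ≤ n ∧ n ≤ 100000 ∧ vis[n.toNat]! = true ∧ dist[n.toNat]! = d) →
    unvis vis + 2 ≤ fB →
    ∃ (v : Int) (fA : Nat),
      loopB target fB F vis d = some v ∧
      fA ≤ F.length + unvis vis + 1 ∧
      loopL target fA F vis dist = some v := by
  intro fB
  induction fB with
  | zero => intro F vis dist d _ _ _ hfuel; omega
  | succ fB ih =>
    intro F vis dist d h1 h2 hF hfuel
    cases F with
    | nil =>
      exact ⟨0, 1, by simp [loopB], by omega, by simp [loopL]⟩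
    | cons f0 rest =>
      by_cases hin : target ∈ (f0 :: rest)
      · refine ⟨d, (f0 :: rest).length, ?_, by omega, ?_⟩
        · have hc : ((f0 :: rest).contains target) = true := by simpa using hin
          simp only [loopB, hc]
          simp
        · have := level_hit target d (f0 :: rest) [] vis dist h1 h2 hF hin 0
          simpa using this
      · obtain ⟨vis', dist', new, eB, eA, s1, s2, hnew, hcount⟩ :=
          level_miss target d (f0 :: rest) [] vis dist h1 h2 hF (by simp) hin
        have hloopB : loopB target (fB + 1) (f0 :: rest) vis d =
            loopB target fB new vis' (d + 1) := by
          have hc : ((f0 :: rest).contains target) = false := by simpa using hin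
          have eB' := eB
          simp only [List.foldl_cons] at eB'
          simp only [loopB, hc, List.foldl_cons, eB']
          simp
        cases new with
        | nil =>
          obtain ⟨fB', rfl⟩ : ∃ fB', fB = fB' + 1 := ⟨fB - 1, by omega⟩
          refine ⟨0, (f0 :: rest).length + 1, ?_, by omega, ?_⟩
          · rw [hloopB]; simp [loopB]
          · have := eA 1
            simpa using this.trans (by simp [loopL])
        | cons y ys =>
          have hcnt : unvis vis' + (y :: ys).length = unvis vis := by omega
          have hfuel' : unvis vis' + 2 ≤ fB := by simp at hcnt; omega
          obtain ⟨v, fA', hB', hbound, hA'⟩ :=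
            ih (y :: ys) vis' dist' (d + 1) s1 s2 (fun n hn => hnew n (by simpa using hn))
              hfuel'
          refine ⟨v, (f0 :: rest).length + fA', ?_, ?_, ?_⟩
          · rw [hloopB]; exact hB'
          · simp at hbound hcnt ⊢; omega
          · have := eA fA'
            simpa using this.trans hA'

-- ===== VERDICT (by name: the statement is the Claim_ definition above) =====
theorem bfs_spec : Claim_equal_bfs := by
  intro start target _ hpre
  obtain ⟨hs0, hs1, ht0, ht1⟩ := hpre
  unfold Spec_bfs bfs bfs_alt
  set vis0 := (Array.replicate 100001 false).setIfInBounds start.toNat true with hvis0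
  have hslt : start.toNat < 100001 := toNat_lt start hs0 hs1
  have hsz : vis0.size = 100001 := by simp [hvis0]
  have hdsz : (Array.replicate 100001 (0 : Int)).size = 100001 := by simp
  have hF : ∀ n ∈ [start], 0 ≤ n ∧ n ≤ 100000 ∧ vis0[n.toNat]! = true ∧
      (Array.replicate 100001 (0 : Int))[n.toNat]! = (0 : Int) := by
    intro n hn
    have : n = start := by simpa using hn
    subst this
    refine ⟨hs0, hs1, ?_, ?_⟩
    · rw [hvis0]; exact aget_set_self _ _ (by simp; omega) true
    · exact aget_replicate 100001 n.toNat hslt 0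
  have hfuel : unvis vis0 + 2 ≤ 200002 := by have := unvis_le vis0; omega
  obtain ⟨v, fA, hB, hbound, hA⟩ :=
    main_sim target 200002 [start] vis0 (Array.replicate 100001 0) 0 hsz hdsz hF hfuel
  have hA' : loopL target 400004 [start] vis0 (Array.replicate 100001 0) = some v := by
    apply loopL_mono target fA 400004 _ _ _ _ v hA
    have := unvis_le vis0
    simp at hbound
    omega
  show (loopA target 400004 [start] [] vis0 (Array.replicate 100001 0)).getD 0 =
    (loopB target 200002 [start] vis0 0).getD 0
  rw [loopA_bridge target 400004 [start] [] vis0 (Array.replicate 100001 0)]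
  simp only [List.reverse_nil, List.append_nil]
  rw [hA', hB]
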